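-- pv_equiv track=rewrite | github.com/Varshini110203/Company_Policies-Chatbot | backend/app/services/llm_service.py | _truncate_context_smartly
-- ===== SOURCE A (Python) =====
-- def _truncate_context_smartly(context_str: str, max_length: int) -> str:
--     """Smart context truncation preserving most relevant parts"""
--     chunks = context_str.split('\n\n')
--
--     # Keep most relevant chunks (those with higher relevance scores)
--     kept_chunks = []
--     current_length = 0
--
--     for chunk in chunks:
--         chunk_length = len(chunk)
--         if current_length + chunk_length <= max_length:
--             kept_chunks.append(chunk)
--             current_length += chunk_length
--         else:
--             # Try to truncate this chunk
--             lines = chunk.split('\n')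
--             kept_lines = []
--             for line in lines:
--                 if current_length + len(line) <= max_length:
--                     kept_lines.append(line)
--                     current_length += len(line)
--                 else:
--                     break
--             if kept_lines:
--                 kept_chunks.append('\n'.join(kept_lines))
--             break
--
--     return '\n\n'.join(kept_chunks)
-- ===== SOURCE B (Python) =====
-- def _prefix_sums(pieces):
--     """sums[i] = total length of the first i pieces (separators not counted)."""
--     sums = [0]
--     for p in pieces:
--         sums.append(sums[-1] + len(p))
--     return sums
--
--
-- def _last_fitting(cum, budget):
--     """cum is nondecreasing; largest k with cum[k] <= budget (0 if even cum[0] fails),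
--     found by binary search."""
--     if cum[0] > budget:
--         return 0
--     lo, hi = 0, len(cum) - 1
--     while lo < hi:
--         mid = (lo + hi + 1) // 2
--         if cum[mid] <= budget:
--             lo = mid
--         else:
--             hi = mid - 1
--     return lo
--
--
-- def _truncate_context_smartly(context_str: str, max_length: int) -> str:
--     chunks = context_str.split('\n\n')
--     cum = _prefix_sums(chunks)
--     k = _last_fitting(cum, max_length)
--     kept = chunks[:k]
--     if k < len(chunks):
--         lines = chunks[k].split('\n')
--         lcum = [cum[k] + c for c in _prefix_sums(lines)]
--         j = _last_fitting(lcum, max_length)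
--         if j > 0:
--             kept.append('\n'.join(lines[:j]))
--     return '\n\n'.join(kept)
-- ===== Notes on version B (the rewrite author's own statement) =====
-- stated objective: alternative
-- what changed: Replaces A's two accumulating greedy loops with precomputed prefix-sum arrays plus a binary search for the cutoff index in each phase, then slicing and joining the kept prefix.
import Mathlib
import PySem

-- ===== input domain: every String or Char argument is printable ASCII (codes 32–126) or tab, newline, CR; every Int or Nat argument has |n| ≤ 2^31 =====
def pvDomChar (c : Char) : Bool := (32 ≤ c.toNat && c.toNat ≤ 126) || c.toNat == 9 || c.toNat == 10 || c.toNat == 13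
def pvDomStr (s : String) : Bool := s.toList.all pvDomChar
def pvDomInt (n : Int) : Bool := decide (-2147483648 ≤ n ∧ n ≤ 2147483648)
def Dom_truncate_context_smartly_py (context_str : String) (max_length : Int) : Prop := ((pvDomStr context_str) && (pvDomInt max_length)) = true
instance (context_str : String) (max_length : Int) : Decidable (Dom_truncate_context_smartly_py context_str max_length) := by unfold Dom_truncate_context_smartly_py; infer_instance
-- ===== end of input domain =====

-- B replaces A's two accumulating greedy loops with prefix sums + binary search for the
-- cutoff index per phase; a genuinely different algorithm of the same cost (objective: alternative).

-- ===== PORT A =====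
-- s.split(sep) with a nonempty literal sep: PySem.Str.split? returns none only for sep = ""
def pvSplit (s sep : String) : List String := (PySem.Str.split? s sep).getD []

-- the inner 'for line in lines: … else break' loop (returns the kept lines)
def pvALineLoop (lines : List String) (max_length : Int) (cur : Int) : List String :=
  match lines with
  | [] => []
  | l :: rest =>
    if cur + PySem.Str.len l ≤ max_length then
      l :: pvALineLoop rest max_length (cur + PySem.Str.len l)
    else []

-- the outer 'for chunk in chunks' loop with its break (returns kept_chunks)
def pvAChunkLoop (chunks : List String) (max_length : Int) (cur : Int) : List String :=
  match chunks with
  | [] => []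
  | chunk :: rest =>
    if cur + PySem.Str.len chunk ≤ max_length then
      chunk :: pvAChunkLoop rest max_length (cur + PySem.Str.len chunk)
    else
      let lines := pvSplit chunk "\n"
      let kept_lines := pvALineLoop lines max_length cur
      if kept_lines ≠ [] then [PySem.Str.join "\n" kept_lines] else []

def truncate_context_smartly_py (context_str : String) (max_length : Int) : String :=
  PySem.Str.join "\n\n" (pvAChunkLoop (pvSplit context_str "\n\n") max_length 0)

-- ===== PORT B =====
-- sums[i] = total length of the first i pieces
def pvPrefixSums (pieces : List String) : List Int :=
  pieces.foldl (fun sums p => sums ++ [sums.getLastD 0 + PySem.Str.len p]) [0]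

-- binary search: largest k in [lo,hi] with cum[k] ≤ budget, given cum[lo] ≤ budget
def pvBsearch (cum : List Int) (budget : Int) (lo hi : Nat) : Nat :=
  if _h : lo < hi then
    if cum.getD ((lo + hi + 1) / 2) 0 ≤ budget then pvBsearch cum budget ((lo + hi + 1) / 2) hi
    else pvBsearch cum budget lo ((lo + hi + 1) / 2 - 1)
  else lo
termination_by hi - lo
decreasing_by all_goals omega

def pvLastFitting (cum : List Int) (budget : Int) : Nat :=
  if budget < cum.getD 0 0 then 0
  else pvBsearch cum budget 0 (cum.length - 1)

def truncate_context_smartly_py_alt (context_str : String) (max_length : Int) : String :=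
  let chunks := pvSplit context_str "\n\n"
  let cum := pvPrefixSums chunks
  let k := pvLastFitting cum max_length
  let kept := chunks.take k
  let kept :=
    if k < chunks.length then
      let lines := pvSplit (chunks.getD k "") "\n"
      let lcum := (pvPrefixSums lines).map (fun c => cum.getD k 0 + c)
      let j := pvLastFitting lcum max_length
      if 0 < j then kept ++ [PySem.Str.join "\n" (lines.take j)] else kept
    else kept
  PySem.Str.join "\n\n" kept

-- ===== PRECONDITION & SPEC =====
def Spec_truncate_context_smartly_py (context_str : String) (max_length : Int) (out : String) : Prop := out = truncate_context_smartly_py_alt context_str max_length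
instance (context_str : String) (max_length : Int) (out : String) : Decidable (Spec_truncate_context_smartly_py context_str max_length out) := by unfold Spec_truncate_context_smartly_py; infer_instance

-- ===== CLAIM (what is proved, stated in full; the proofs are below) =====
def Claim_equal_truncate_context_smartly_py : Prop := ∀ (context_str : String) (max_length : Int), Dom_truncate_context_smartly_py context_str max_length → Spec_truncate_context_smartly_py context_str max_length (truncate_context_smartly_py context_str max_length)

-- ===== LEMMAS AND PROOFS =====

-- the greedy cutoff count both programs compute
def pvGcount (ps : List String) (b cur : Int) : Nat :=
  match ps with
  | [] => 0
  | p :: rest => if cur + PySem.Str.len p ≤ b then pvGcount rest b (cur + PySem.Str.len p) + 1 else 0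

-- cumulative sums from a seed
def pvCumFrom (cur : Int) : List String → List Int
  | [] => [cur]
  | p :: rest => cur :: pvCumFrom (cur + PySem.Str.len p) rest

theorem pvCumFrom_length (cur : Int) (ps : List String) : (pvCumFrom cur ps).length = ps.length + 1 := by
  induction ps generalizing cur with
  | nil => simp [pvCumFrom]
  | cons p rest ih => simp [pvCumFrom, ih]

theorem pvPrefixSums_aux (ps : List String) (acc : List Int) (cur : Int) (h : acc.getLast? = some cur) :
    ps.foldl (fun sums p => sums ++ [sums.getLastD 0 + PySem.Str.len p]) acc
      = acc.dropLast ++ pvCumFrom cur ps := by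
  induction ps generalizing acc cur with
  | nil =>
    simp [pvCumFrom]
    cases acc using List.reverseRecOn with
    | nil => simp at h
    | append_singleton xs x => simp at h; simp [h]
  | cons p rest ih =>
    simp only [List.foldl_cons]
    rw [ih (acc ++ [acc.getLastD 0 + PySem.Str.len p]) (cur + PySem.Str.len p)
        (by simp [List.getLastD_eq_getLast?, h])]
    cases acc using List.reverseRecOn with
    | nil => simp at h
    | append_singleton xs x =>
      simp at h
      simp [h, pvCumFrom]

theorem pvPrefixSums_eq (ps : List String) : pvPrefixSums ps = pvCumFrom 0 ps := by
  unfold pvPrefixSums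
  rw [pvPrefixSums_aux ps [0] 0 (by simp)]
  simp

theorem pvCumFrom_map_add (a cur : Int) (ps : List String) :
    (pvCumFrom cur ps).map (fun c => a + c) = pvCumFrom (a + cur) ps := by
  induction ps generalizing cur with
  | nil => simp [pvCumFrom]
  | cons p rest ih => simp [pvCumFrom, ih, add_assoc]

theorem pvCumFrom_getD_zero (cur : Int) (ps : List String) : (pvCumFrom cur ps).getD 0 0 = cur := by
  cases ps <;> simp [pvCumFrom]

theorem pvStrLen_nonneg (s : String) : 0 ≤ PySem.Str.len s := by
  simp [PySem.Str.len_eq]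

-- monotonicity: entries of pvCumFrom are nondecreasing in the index
theorem pvCumFrom_mono (cur : Int) (ps : List String) (i j : Nat) (hij : i ≤ j)
    (hj : j < (pvCumFrom cur ps).length) :
    (pvCumFrom cur ps).getD i 0 ≤ (pvCumFrom cur ps).getD j 0 := by
  induction ps generalizing cur i j with
  | nil =>
    rw [pvCumFrom_length] at hj
    simp only [List.length_nil] at hj
    have hj0 : j = 0 := by omega
    have hi0 : i = 0 := by omega
    subst hj0; subst hi0
    exact le_refl _
  | cons p rest ih =>
    rw [pvCumFrom_length, List.length_cons] at hj
    simp only [pvCumFrom]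
    cases i with
    | zero =>
      cases j with
      | zero => exact le_refl _
      | succ j' =>
        rw [List.getD_cons_zero, List.getD_cons_succ]
        have h0 : (pvCumFrom (cur + PySem.Str.len p) rest).getD 0 0 = cur + PySem.Str.len p :=
          pvCumFrom_getD_zero _ _
        have hrec := ih (cur + PySem.Str.len p) 0 j' (Nat.zero_le _)
          (by rw [pvCumFrom_length]; omega)
        have hlen := pvStrLen_nonneg p
        omega
    | succ i' =>
      cases j with
      | zero => omega
      | succ j' =>
        rw [List.getD_cons_succ, List.getD_cons_succ]
        exact ih _ i' j' (by omega) (by rw [pvCumFrom_length]; omega)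

-- characterization produced by the binary search (no monotonicity needed)
theorem pvBsearch_spec (cum : List Int) (b : Int) (lo hi : Nat) (hlh : lo ≤ hi)
    (hlo : cum.getD lo 0 ≤ b) :
    lo ≤ pvBsearch cum b lo hi ∧ pvBsearch cum b lo hi ≤ hi ∧
      cum.getD (pvBsearch cum b lo hi) 0 ≤ b ∧
      (pvBsearch cum b lo hi < hi → b < cum.getD (pvBsearch cum b lo hi + 1) 0) := by
  induction lo, hi using pvBsearch.induct cum b with
  | case1 lo hi h hmid ih =>
    rw [pvBsearch]
    rw [dif_pos h, if_pos hmid]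
    have := ih (by omega) hmid
    omega
  | case2 lo hi h hmid ih =>
    rw [pvBsearch]
    rw [dif_pos h, if_neg hmid]
    have hmid' : b < cum.getD ((lo + hi + 1) / 2) 0 := by omega
    have := ih (by omega) hlo
    rcases this with ⟨h1, h2, h3, h4⟩
    refine ⟨h1, by omega, h3, ?_⟩
    intro hr
    by_cases hc : pvBsearch cum b lo ((lo + hi + 1) / 2 - 1) < (lo + hi + 1) / 2 - 1
    · exact h4 hc
    · have he : pvBsearch cum b lo ((lo + hi + 1) / 2 - 1) + 1 = (lo + hi + 1) / 2 := by omega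
      rw [he]; exact hmid'
  | case3 lo hi hnl =>
    rw [pvBsearch]
    rw [dif_neg hnl]
    omega

-- the greedy count satisfies the same characterization
theorem pvGcount_le_length (ps : List String) (b cur : Int) : pvGcount ps b cur ≤ ps.length := by
  induction ps generalizing cur with
  | nil => simp [pvGcount]
  | cons p rest ih =>
    simp only [pvGcount]
    split
    · simpa using Nat.succ_le_succ (ih _)
    · simp

theorem pvGcount_char (ps : List String) (b cur : Int) (h : cur ≤ b) :
    (pvCumFrom cur ps).getD (pvGcount ps b cur) 0 ≤ b ∧
      (pvGcount ps b cur < ps.length → b < (pvCumFrom cur ps).getD (pvGcount ps b cur + 1) 0) := by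
  induction ps generalizing cur with
  | nil => simp [pvGcount, pvCumFrom, h]
  | cons p rest ih =>
    simp only [pvGcount, pvCumFrom]
    by_cases hc : cur + PySem.Str.len p ≤ b
    · simp only [hc, if_pos, List.getD_cons_succ, List.length_cons]
      have := ih (cur + PySem.Str.len p) hc
      exact ⟨this.1, fun hl => this.2 (by omega)⟩
    · simp only [hc, if_neg, not_false_iff, List.getD_cons_zero, List.getD_cons_succ]
      refine ⟨h, fun _ => ?_⟩
      rw [pvCumFrom_getD_zero]
      omega

-- uniqueness of the characterization on a nondecreasing cumulative list
theorem pvChar_unique (cur : Int) (ps : List String) (b : Int) (r g : Nat)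
    (hr : r ≤ ps.length) (hg : g ≤ ps.length)
    (hr1 : (pvCumFrom cur ps).getD r 0 ≤ b) (hr2 : r < ps.length → b < (pvCumFrom cur ps).getD (r + 1) 0)
    (hg1 : (pvCumFrom cur ps).getD g 0 ≤ b) (hg2 : g < ps.length → b < (pvCumFrom cur ps).getD (g + 1) 0) :
    r = g := by
  by_contra hne
  rcases Nat.lt_or_ge r g with hlt | hge
  · have h2 := hr2 (by omega)
    have := pvCumFrom_mono cur ps (r + 1) g (by omega) (by rw [pvCumFrom_length]; omega)
    omega
  · have hlt : g < r := by omega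
    have h2 := hg2 (by omega)
    have := pvCumFrom_mono cur ps (g + 1) r (by omega) (by rw [pvCumFrom_length]; omega)
    omega

-- pvLastFitting on a seeded cumulative list computes the greedy count
theorem pvLastFitting_eq_gcount (ps : List String) (b cur : Int) :
    pvLastFitting (pvCumFrom cur ps) b = pvGcount ps b cur := by
  unfold pvLastFitting
  by_cases h0 : b < (pvCumFrom cur ps).getD 0 0
  · rw [if_pos h0]
    rw [pvCumFrom_getD_zero] at h0
    cases ps with
    | nil => simp [pvGcount]
    | cons p rest =>
      have := pvStrLen_nonneg p
      simp only [pvGcount]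
      rw [if_neg (by omega)]
  · rw [if_neg h0]
    rw [pvCumFrom_getD_zero] at h0
    have h0' : cur ≤ b := by omega
    have hlen : (pvCumFrom cur ps).length - 1 = ps.length := by
      rw [pvCumFrom_length]
      omega
    rw [hlen]
    have hs := pvBsearch_spec (pvCumFrom cur ps) b 0 ps.length
      (Nat.zero_le _) (by rw [pvCumFrom_getD_zero]; exact h0')
    have hg := pvGcount_char ps b cur h0'
    exact pvChar_unique cur ps b _ _ hs.2.1 (pvGcount_le_length ps b cur) hs.2.2.1 hs.2.2.2
      hg.1 hg.2

-- A's line loop keeps exactly the greedy prefix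
theorem pvALineLoop_eq (lines : List String) (b cur : Int) :
    pvALineLoop lines b cur = lines.take (pvGcount lines b cur) := by
  induction lines generalizing cur with
  | nil => simp [pvALineLoop, pvGcount]
  | cons l rest ih =>
    simp only [pvALineLoop, pvGcount]
    split
    · simp [ih]
    · simp

-- sum of the lengths of the first k pieces = the k-th cumulative entry
theorem pvCumFrom_getD (cur : Int) (ps : List String) (k : Nat) (hk : k ≤ ps.length) :
    (pvCumFrom cur ps).getD k 0 = cur + ((ps.take k).map PySem.Str.len).sum := by
  induction ps generalizing cur k with
  | nil =>
    simp only [List.length_nil, Nat.le_zero] at hk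
    subst hk
    simp [pvCumFrom]
  | cons p rest ih =>
    cases k with
    | zero =>
      simp only [List.take_zero, List.map_nil, List.sum_nil, add_zero]
      exact pvCumFrom_getD_zero _ _
    | succ k' =>
      simp only [pvCumFrom, List.getD_cons_succ, List.take_succ_cons, List.map_cons, List.sum_cons]
      rw [ih (cur + PySem.Str.len p) k' (by simp at hk; omega)]
      ring

-- A's chunk loop in terms of the greedy counts
theorem pvAChunkLoop_eq (chunks : List String) (b cur : Int) :
    pvAChunkLoop chunks b cur =
      chunks.take (pvGcount chunks b cur) ++
        (if _ : pvGcount chunks b cur < chunks.length then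
          (let lines := pvSplit (chunks.getD (pvGcount chunks b cur) "") "\n"
           let j := pvGcount lines b (cur + ((chunks.take (pvGcount chunks b cur)).map PySem.Str.len).sum)
           if 0 < j then [PySem.Str.join "\n" (lines.take j)] else [])
        else []) := by
  induction chunks generalizing cur with
  | nil => simp [pvAChunkLoop, pvGcount]
  | cons c rest ih =>
    simp only [pvAChunkLoop, pvGcount]
    by_cases hc : cur + PySem.Str.len c ≤ b
    · simp only [hc, if_pos, List.length_cons]
      rw [ih (cur + PySem.Str.len c)]
      have hlt : pvGcount rest b (cur + PySem.Str.len c) + 1 < rest.length + 1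
          ↔ pvGcount rest b (cur + PySem.Str.len c) < rest.length := by omega
      by_cases hd : pvGcount rest b (cur + PySem.Str.len c) < rest.length
      · simp only [List.take_succ_cons, List.getD_cons_succ, dif_pos hd, dif_pos (hlt.mpr hd)]
        simp [add_assoc]
      · simp only [List.take_succ_cons, dif_neg hd, dif_neg (by omega : ¬ (pvGcount rest b (cur + PySem.Str.len c) + 1 < rest.length + 1))]
        simp
    · simp only [hc, if_neg, not_false_iff, List.take_zero, List.nil_append, List.getD_cons_zero]
      have hpos : (0:Nat) < rest.length + 1 := by omega
      rw [dif_pos (by simp only [List.length_cons]; omega)]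
      rw [pvALineLoop_eq]
      simp only [List.map_nil, List.sum_nil, add_zero]
      by_cases hj : 0 < pvGcount (pvSplit c "\n") b cur
      · have hne : (pvSplit c "\n").take (pvGcount (pvSplit c "\n") b cur) ≠ [] := by
          have hle := pvGcount_le_length (pvSplit c "\n") b cur
          intro he
          have hlen := congrArg List.length he
          rw [List.length_take] at hlen
          simp only [List.length_nil] at hlen
          omega
        simp [hne, hj]
      · have he : (pvSplit c "\n").take (pvGcount (pvSplit c "\n") b cur) = [] := by
          have : pvGcount (pvSplit c "\n") b cur = 0 := by omega
          simp [this]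
        simp [he, hj]

-- ===== VERDICT (by name: the statement is the Claim_ definition above) =====
theorem truncate_context_smartly_py_spec : Claim_equal_truncate_context_smartly_py := by
  intro context_str max_length _
  unfold Spec_truncate_context_smartly_py truncate_context_smartly_py truncate_context_smartly_py_alt
  simp only [pvPrefixSums_eq]
  rw [pvAChunkLoop_eq]
  set chunks := pvSplit context_str "\n\n" with hch
  rw [pvLastFitting_eq_gcount chunks max_length 0]
  set k := pvGcount chunks max_length 0 with hk
  have hkle : k ≤ chunks.length := pvGcount_le_length _ _ _
  by_cases hlt : k < chunks.length
  · simp only [dif_pos hlt, if_pos hlt]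
    rw [pvCumFrom_map_add, pvCumFrom_getD 0 chunks k hkle]
    rw [pvLastFitting_eq_gcount]
    simp only [zero_add, add_zero, List.map_take]
    split_ifs <;> simp
  · simp [hlt]
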